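-- pv_equiv track=rewrite | github.com/anurag9601/brocode_challenge | 2024/python/9_aug.py | find_missing_num
-- ===== SOURCE A (Python) =====
-- def find_missing_num(lst):
--     minimum = float("inf")
--     maximum = float("-inf")
--     for i in lst:
--         if(minimum > i):
--             minimum = i
--     for j in lst:
--         if(maximum < j):
--             maximum = j
--     for k in range(minimum, maximum + 1):
--         if(k not in lst):
--             return k
-- ===== SOURCE B (Python) =====
-- def find_missing_num(lst):
--     s = sorted(set(lst))
--     for a, b in zip(s, s[1:]):
--         if b - a > 1:
--             return a + 1
--     return None
-- ===== Notes on version B (the rewrite author's own statement) =====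
-- stated objective: alternative
-- what changed: Instead of computing min/max with two loops and scanning range(min,max+1) with an O(n) membership test per value, B sorts the deduplicated list once and returns a+1 at the first adjacent gap.
import Mathlib
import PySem

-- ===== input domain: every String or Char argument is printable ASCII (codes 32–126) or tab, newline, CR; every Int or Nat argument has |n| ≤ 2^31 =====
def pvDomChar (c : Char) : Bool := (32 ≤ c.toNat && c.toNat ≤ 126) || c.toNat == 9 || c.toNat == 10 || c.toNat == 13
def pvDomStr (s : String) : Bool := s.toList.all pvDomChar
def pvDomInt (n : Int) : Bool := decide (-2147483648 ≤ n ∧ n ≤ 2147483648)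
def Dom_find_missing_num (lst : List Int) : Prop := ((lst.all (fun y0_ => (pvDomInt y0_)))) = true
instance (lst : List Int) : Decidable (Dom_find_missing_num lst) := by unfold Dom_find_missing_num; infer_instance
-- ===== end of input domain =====

-- B is an alternative algorithm: sort the deduplicated list once and return a+1 at the
-- first adjacent gap, instead of A's min/max loops plus a membership scan over the range.

-- ===== PORT A =====
-- Python's `minimum = float("inf")` / `maximum = float("-inf")` before the loops is
-- modelled by an Option Int state (none = still infinite); with a nonempty list the
-- loops behave identically, and the empty list (where Python raises) is outside Pre_.
-- the `for k in range(minimum, maximum+1): if k not in lst: return k` loop, with Python's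
-- lazy range and early return rendered as a counting recursion (k runs from minimum while k < maximum+1)
def scanRange (lst : List Int) (k M : Int) : Option Int :=
  if _h : k < M + 1 then
    if !lst.contains k then some k
    else scanRange lst (k + 1) M
  else none
termination_by (M + 1 - k).toNat
decreasing_by omega

def find_missing_num (lst : List Int) : Option Int :=
  let minimum := lst.foldl (fun m i => match m with
    | none => some i
    | some v => if v > i then some i else some v) none
  let maximum := lst.foldl (fun m j => match m with
    | none => some j
    | some v => if v < j then some j else some v) none
  match minimum, maximum with
  | some m, some M => scanRange lst m M
  | _, _ => none  -- empty list: Python raises TypeError here (excluded by Pre_)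

-- ===== PORT B =====
-- the `for a, b in zip(s, s[1:])` loop of Source B
def gapScan : List Int → Option Int
  | a :: b :: t => if b - a > 1 then some (a + 1) else gapScan (b :: t)
  | _ => none

def find_missing_num_alt (lst : List Int) : Option Int :=
  gapScan (PySem.List.sorted (PySem.Set.ofList lst) (fun x => x) false)

-- ===== PRECONDITION & SPEC =====
-- Pre_ excludes only the empty list, on which A raises TypeError (range on float inf).
def Pre_find_missing_num (lst : List Int) : Prop := lst ≠ []
instance (lst : List Int) : Decidable (Pre_find_missing_num lst) := by unfold Pre_find_missing_num; infer_instance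
def pvWitness_find_missing_num : List Int := ([1, 3])

def Spec_find_missing_num (lst : List Int) (out : Option Int) : Prop := out = find_missing_num_alt lst
instance (lst : List Int) (out : Option Int) : Decidable (Spec_find_missing_num lst out) := by unfold Spec_find_missing_num; infer_instance

-- ===== CLAIM (what is proved, stated in full; the proofs are below) =====
def Claim_equal_find_missing_num : Prop := ∀ (lst : List Int), Dom_find_missing_num lst → Pre_find_missing_num lst → Spec_find_missing_num lst (find_missing_num lst)

-- ===== LEMMAS AND PROOFS =====


theorem foldl_step_min (t : List Int) (v : Int) :
    t.foldl (fun m i => match m with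
      | none => some i
      | some v => if v > i then some i else some v) (some v) = some (t.foldl min v) := by
  induction t generalizing v with
  | nil => rfl
  | cons i t ih =>
    simp only [List.foldl_cons]
    have h1 : (if v > i then some i else some v) = some (min v i) := by
      split_ifs with h <;> simp [min_def] <;> omega
    rw [h1, ih]

theorem foldl_step_max (t : List Int) (v : Int) :
    t.foldl (fun m j => match m with
      | none => some j
      | some v => if v < j then some j else some v) (some v) = some (t.foldl max v) := by
  induction t generalizing v with
  | nil => rfl
  | cons j t ih =>
    simp only [List.foldl_cons]
    have h1 : (if v < j then some j else some v) = some (max v j) := by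
      split_ifs with h <;> simp [max_def] <;> omega
    rw [h1, ih]

theorem find?_congr_mem {p q : Int → Bool} (l : List Int) (h : ∀ x ∈ l, p x = q x) :
    l.find? p = l.find? q := by
  induction l with
  | nil => rfl
  | cons x t ih =>
    have hx := h x (by simp)
    simp only [List.find?_cons, hx]
    cases q x
    · exact ih (fun y hy => h y (by simp [hy]))
    · rfl

theorem le_getLast_of_pairwise (t : List Int) (b : Int) (hp : (b :: t).Pairwise (· < ·)) :
    ∀ y ∈ b :: t, y ≤ (b :: t).getLast (by simp) := by
  induction t generalizing b with
  | nil => simp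
  | cons c t ih =>
    intro y hy
    have hbc : b < c := (List.rel_of_pairwise_cons hp) (by simp)
    have hrest := ih c hp.tail
    rw [List.getLast_cons (by simp)]
    rcases List.mem_cons.1 hy with rfl | hy
    · exact le_of_lt (lt_of_lt_of_le hbc (hrest c (by simp)))
    · exact hrest y hy

theorem scanRange_eq_find? (lst : List Int) (k M : Int) :
    scanRange lst k M = (PySem.List.pyRange k (M + 1) 1).find? (fun x => !lst.contains x) := by
  by_cases h : k < M + 1
  · rw [scanRange, dif_pos h, PySem.List.pyRange_one_cons h, List.find?_cons]
    cases hc : (!lst.contains k) with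
    | true => rfl
    | false => exact scanRange_eq_find? lst (k + 1) M
  · rw [scanRange, dif_neg h, PySem.List.pyRange_one_eq_nil (by omega)]
    rfl
termination_by (M + 1 - k).toNat
decreasing_by omega

theorem gap_main (t : List Int) (a : Int) (hp : (a :: t).Pairwise (· < ·)) :
    (PySem.List.pyRange a ((a :: t).getLast (by simp) + 1) 1).find?
      (fun k => !(a :: t).contains k) = gapScan (a :: t) := by
  induction t generalizing a with
  | nil =>
    simp only [List.getLast_singleton]
    rw [PySem.List.pyRange_one_singleton]
    simp [gapScan]
  | cons b t ih =>
    have hab : a < b := (List.rel_of_pairwise_cons hp) (by simp)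
    have hrest : ∀ x ∈ t, b < x := fun x hx => (List.rel_of_pairwise_cons hp.tail) hx
    have hlast := le_getLast_of_pairwise t b hp.tail
    have hbM : b ≤ (b :: t).getLast (by simp) := hlast b (by simp)
    rw [List.getLast_cons (by simp)]
    set M := (b :: t).getLast (by simp) with hM
    rw [PySem.List.pyRange_one_cons (by omega),
        List.find?_cons_of_neg (p := fun k => !(a :: b :: t).contains k) (by simp)]
    by_cases hgap : b - a > 1
    · -- a + 1 is missing from the list: A's scan and B's gap test both produce it
      have hnotmem : (a + 1) ∉ (a :: b :: t) := by
        simp only [List.mem_cons]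
        rintro (h | h | h)
        · omega
        · omega
        · exact absurd (hrest _ h) (by omega)
      rw [PySem.List.pyRange_one_cons (by omega),
          List.find?_cons_of_pos (p := fun k => !(a :: b :: t).contains k) (by simp [hnotmem])]
      simp [gapScan, hgap]
    · have hb : b = a + 1 := by omega
      subst hb
      have ihb := ih (a + 1) hp.tail
      rw [← hM] at ihb
      rw [find?_congr_mem (q := fun k => !((a + 1) :: t).contains k) _ ?_]
      · rw [ihb]
        simp [gapScan]
      · intro k hk
        have hkb : a + 1 ≤ k := (PySem.List.mem_pyRange_one.1 hk).1
        simp only [List.contains_cons]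
        have hka : (k == a) = false := by
          simp only [beq_eq_false_iff_ne, ne_eq]
          omega
        simp [hka]

theorem find_missing_num_spec : Claim_equal_find_missing_num := by
  intro lst _ hpre
  unfold Spec_find_missing_num find_missing_num find_missing_num_alt
  obtain ⟨x, t, rfl⟩ := List.exists_cons_of_ne_nil hpre
  simp only [List.foldl_cons]
  rw [foldl_step_min, foldl_step_max]
  show scanRange (x :: t) (t.foldl min x) (t.foldl max x) = _
  rw [scanRange_eq_find?]
  generalize hSdef : PySem.List.sorted (PySem.Set.ofList (x :: t)) (fun x => x) false = S
  have hSmem : ∀ k : Int, k ∈ S ↔ k ∈ x :: t := by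
    intro k
    rw [← hSdef, PySem.List.mem_sorted, PySem.Set.mem_ofList]
  have hSpw : S.Pairwise (· < ·) := hSdef ▸ PySem.List.sorted_ofList_pairwise_lt (x :: t)
  have hSne : S ≠ [] := by
    intro h
    have := (hSmem x).2 (by simp)
    simp [h] at this
  obtain ⟨s0, rest, rfl⟩ := List.exists_cons_of_ne_nil hSne
  have hminP : PySem.List.min? (x :: t) (fun y => y) = some (t.foldl min x) :=
    PySem.List.min?_id_cons x t
  have hmaxP : PySem.List.max? (x :: t) (fun y => y) = some (t.foldl max x) :=
    PySem.List.max?_id_cons x t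
  have hmin_mem : t.foldl min x ∈ x :: t := PySem.List.min?_mem hminP
  have hmin_le : ∀ y ∈ x :: t, t.foldl min x ≤ y := PySem.List.min?_isMin hminP
  have hmax_mem : t.foldl max x ∈ x :: t := PySem.List.max?_mem hmaxP
  have hmax_ge : ∀ y ∈ x :: t, y ≤ t.foldl max x := PySem.List.max?_isMax hmaxP
  have hhead : t.foldl min x = s0 := by
    have h1 : s0 ≤ t.foldl min x := by
      rcases List.mem_cons.1 ((hSmem _).2 hmin_mem) with h | h
      · omega
      · exact le_of_lt ((List.rel_of_pairwise_cons hSpw) h)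
    have h2 : t.foldl min x ≤ s0 := hmin_le s0 ((hSmem s0).1 (by simp))
    omega
  have hlastS : t.foldl max x = (s0 :: rest).getLast (by simp) := by
    have hmem : (s0 :: rest).getLast (by simp) ∈ s0 :: rest := List.getLast_mem _
    have h1 : (s0 :: rest).getLast (by simp) ≤ t.foldl max x :=
      hmax_ge _ ((hSmem _).1 hmem)
    have h2 : t.foldl max x ≤ (s0 :: rest).getLast (by simp) :=
      le_getLast_of_pairwise rest s0 hSpw _ ((hSmem _).2 hmax_mem)
    omega
  rw [hhead, hlastS]
  rw [find?_congr_mem (q := fun k => !(s0 :: rest).contains k) _ ?_]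
  · exact gap_main rest s0 hSpw
  · intro k _
    simp only [List.contains_eq_mem]
    congr 1
    exact decide_eq_decide.mpr (hSmem k).symm

-- ===== VERDICT (by name: the statement is the Claim_ definition above) =====
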